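-- pv_equiv track=rewrite | github.com/FilipSkoro/Master-Thesis-FER-2023 | Program/Matrices_functions.py | get_Trains_On_Segments
-- ===== SOURCE A (Python) =====
-- def get_Trains_On_Segments(data, trains):
--
--     '''
--     This function is used for making strings that represent trains on
--     their segments and then returns it as a list. It gets two arguments;
--     'data' which is dictionary where trains are keys and lists of each trains
--     stations are values and 'trains' which is list of trains.
--     '''
--
--     trains_on_segments = []
--
--     for train in trains:
--         route = data.get(train)
--         for i in range(0, len(route)):
--             if (i != (len(route) - 1)):
--                 if (route[i] > route[i+1]):
--                     segment = route[i+1] + route[i]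
--                 else:
--                     segment = route[i] + route[i+1]
--             else:
--                 if (route[i] > route[0]):
--                     segment = route[0] + route[i]
--                 else:
--                     segment = route[i] + route[0]
--
--             segment = train + segment
--             trains_on_segments.append(segment)
--
--     return trains_on_segments
-- ===== SOURCE B (Python) =====
-- def get_Trains_On_Segments(data, trains):
--     def walk(train, first, xs):
--         # recursively emit one canonical segment per element; last wraps to first
--         if len(xs) == 1:
--             return [train + min(xs[0], first) + max(xs[0], first)]
--         return [train + min(xs[0], xs[1]) + max(xs[0], xs[1])] + walk(train, first, xs[1:])
--     out = []
--     for train in trains: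
--         route = data.get(train)
--         if len(route) > 0:
--             out.extend(walk(train, route[0], route))
--     return out
-- ===== Notes on version B (the rewrite author's own statement) =====
-- stated objective: alternative
-- what changed: Replaces A's index loop with its special-cased last-index comparison branch by a structural recursion over the route carrying the first station for the wrap-around, with each segment built as the canonical min++max of the pair instead of a greater-than branch.
import Mathlib
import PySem

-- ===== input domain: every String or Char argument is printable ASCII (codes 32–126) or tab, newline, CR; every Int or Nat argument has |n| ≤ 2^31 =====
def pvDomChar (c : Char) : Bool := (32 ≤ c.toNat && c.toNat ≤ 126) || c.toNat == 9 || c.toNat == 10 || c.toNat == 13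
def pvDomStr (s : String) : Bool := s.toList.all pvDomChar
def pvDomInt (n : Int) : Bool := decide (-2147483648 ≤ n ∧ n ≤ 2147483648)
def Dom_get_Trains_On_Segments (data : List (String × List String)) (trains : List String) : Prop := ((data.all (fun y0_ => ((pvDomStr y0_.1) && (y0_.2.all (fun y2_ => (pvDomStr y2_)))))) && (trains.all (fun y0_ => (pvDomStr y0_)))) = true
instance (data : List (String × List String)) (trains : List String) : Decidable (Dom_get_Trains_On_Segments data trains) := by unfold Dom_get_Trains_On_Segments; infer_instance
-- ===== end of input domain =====

-- B replaces A's index loop with its special-cased last index by a structural recursion over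
-- the route carrying the first station, each segment built as min++max; return values proved equal.

-- ===== PORT A =====
-- inner loop of A for one train: for i in range(0, len(route)): …append(train + segment)
def pvLoopA (train : String) (route : List String) (acc : List String) : List String :=
  (PySem.List.pyRange 0 (PySem.List.len route) 1).foldl (fun acc i =>
    let segment :=
      if i ≠ PySem.List.len route - 1 then
        (if PySem.List.pyGetD route (i+1) "" < PySem.List.pyGetD route i "" then
           PySem.List.pyGetD route (i+1) "" ++ PySem.List.pyGetD route i ""
         else
           PySem.List.pyGetD route i "" ++ PySem.List.pyGetD route (i+1) "")
      else
        (if PySem.List.pyGetD route 0 "" < PySem.List.pyGetD route i "" then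
           PySem.List.pyGetD route 0 "" ++ PySem.List.pyGetD route i ""
         else
           PySem.List.pyGetD route i "" ++ PySem.List.pyGetD route 0 "")
    acc ++ [train ++ segment]) acc

def get_Trains_On_Segments (data : List (String × List String)) (trains : List String) : List String :=
  trains.foldl (fun acc train =>
    pvLoopA train (((PySem.Dict.mk data).get? train).getD []) acc) []

-- ===== PORT B =====
-- recursive helper walk(train, first, xs) of B
def pvWalk (train first : String) : List String → List String
  | [] => []
  | [x] => [train ++ min x first ++ max x first]
  | x :: y :: rest => (train ++ min x y ++ max x y) :: pvWalk train first (y :: rest)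

def get_Trains_On_Segments_alt (data : List (String × List String)) (trains : List String) : List String :=
  trains.foldl (fun acc train =>
    let route := ((PySem.Dict.mk data).get? train).getD []
    acc ++ (match route with
            | [] => []
            | f :: rest => pvWalk train f (f :: rest))) []

-- ===== PRECONDITION & SPEC =====
-- Pre_ excludes trains missing from data: there route is None and A raises TypeError (len(None)).
def Pre_get_Trains_On_Segments (data : List (String × List String)) (trains : List String) : Prop :=
  ∀ t ∈ trains, ((PySem.Dict.mk data).get? t).isSome = true
instance (data : List (String × List String)) (trains : List String) : Decidable (Pre_get_Trains_On_Segments data trains) := by unfold Pre_get_Trains_On_Segments; infer_instance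

def pvWitness_get_Trains_On_Segments : (List (String × List String)) × List String :=
  ([("t1", ["A", "B", "C"]), ("t2", ["B"])], ["t1", "t2", "t1"])

def Spec_get_Trains_On_Segments (data : List (String × List String)) (trains : List String) (out : List String) : Prop := out = get_Trains_On_Segments_alt data trains
instance (data : List (String × List String)) (trains : List String) (out : List String) : Decidable (Spec_get_Trains_On_Segments data trains out) := by unfold Spec_get_Trains_On_Segments; infer_instance

-- ===== CLAIM (what is proved, stated in full; the proofs are below) =====
def Claim_equal_get_Trains_On_Segments : Prop := ∀ (data : List (String × List String)) (trains : List String), Dom_get_Trains_On_Segments data trains → Pre_get_Trains_On_Segments data trains → Spec_get_Trains_On_Segments data trains (get_Trains_On_Segments data trains)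

-- ===== LEMMAS AND PROOFS =====

-- A's branch on > equals the canonical min ++ max form
lemma pvCanon_eq (t x y : String) :
    t ++ (if y < x then y ++ x else x ++ y) = t ++ min x y ++ max x y := by
  rcases le_or_gt x y with h | h
  · rw [if_neg (not_lt.mpr h), min_eq_left h, max_eq_right h, String.append_assoc]
  · rw [if_pos h, min_eq_right h.le, max_eq_left h.le, String.append_assoc]

-- B's recursion equals the map over the route zipped with its rotation
lemma pvWalk_eq (t f : String) (xs : List String) :
    pvWalk t f xs = (xs.zip (xs.tail ++ [f])).map (fun p => t ++ min p.1 p.2 ++ max p.1 p.2) := by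
  induction xs with
  | nil => rfl
  | cons x rest ih =>
    cases rest with
    | nil => rfl
    | cons y r =>
      show (t ++ min x y ++ max x y) :: pvWalk t f (y :: r) = _
      rw [ih]; simp

-- A's inner loop produces that same map
lemma pvLoopA_eq (train : String) (route : List String) (acc : List String) :
    pvLoopA train route acc
      = acc ++ (route.zip (route.tail ++ route.take 1)).map
          (fun p => train ++ min p.1 p.2 ++ max p.1 p.2) := by
  unfold pvLoopA
  rw [PySem.List.foldl_append_singleton_eq_map]
  congr 1
  apply List.ext_getElem
  · simp [PySem.List.length_pyRange_one, PySem.List.len]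
    omega
  · intro k hk1 hk2
    simp only [PySem.List.length_pyRange_one, List.length_map, PySem.List.len] at hk1
    have hkr : k < route.length := by omega
    simp only [List.getElem_map, PySem.List.getElem_pyRange_one, List.getElem_zip, PySem.List.len]
    by_cases hlast : k = route.length - 1
    · rw [if_neg (show ¬ ((0:Int) + k ≠ (route.length:Int) - 1) by omega)]
      have hge : route.tail.length ≤ k := by simp; omega
      rw [List.getElem_append_right hge]
      have h3 : k - route.tail.length = 0 := by simp; omega
      rw [PySem.List.pyGetD_eq_getElem route "" (by omega) (by omega),
          PySem.List.pyGetD_eq_getElem route "" (by omega) (by omega)]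
      have h2 : ((0:Int) + (k:Int)).toNat = k := by omega
      simp only [Int.toNat_zero, h2, h3, List.getElem_take]
      exact pvCanon_eq _ _ _
    · rw [if_pos (show ((0:Int) + k ≠ (route.length:Int) - 1) by omega)]
      have hlt : k < route.tail.length := by simp; omega
      rw [List.getElem_append_left hlt]
      rw [PySem.List.pyGetD_eq_getElem route "" (by omega) (by omega),
          PySem.List.pyGetD_eq_getElem route "" (by omega) (by omega)]
      have h1 : ((0:Int) + (k:Int) + 1).toNat = k + 1 := by omega
      have h2 : ((0:Int) + (k:Int)).toNat = k := by omega
      simp only [h1, h2, List.getElem_tail]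
      exact pvCanon_eq _ _ _

-- the two inner bodies agree for one train
lemma pvInner_eq (train : String) (route : List String) (acc : List String) :
    pvLoopA train route acc
      = acc ++ (match route with
                | [] => []
                | f :: rest => pvWalk train f (f :: rest)) := by
  cases route with
  | nil => simp [pvLoopA_eq]
  | cons f rest => rw [pvLoopA_eq]; show _ = acc ++ pvWalk train f (f :: rest); rw [pvWalk_eq]; simp

lemma pv_main (data : List (String × List String)) (trains : List String) (acc : List String) :
    trains.foldl (fun acc train => pvLoopA train (((PySem.Dict.mk data).get? train).getD []) acc) acc
      = trains.foldl (fun acc train =>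
          let route := ((PySem.Dict.mk data).get? train).getD []
          acc ++ (match route with
                  | [] => []
                  | f :: rest => pvWalk train f (f :: rest))) acc := by
  induction trains generalizing acc with
  | nil => rfl
  | cons t ts ih => rw [List.foldl_cons, List.foldl_cons, pvInner_eq]; exact ih _

-- ===== VERDICT (by name: the statement is the Claim_ definition above) =====
theorem get_Trains_On_Segments_spec : Claim_equal_get_Trains_On_Segments := by
  intro data trains _ _
  unfold Spec_get_Trains_On_Segments get_Trains_On_Segments get_Trains_On_Segments_alt
  exact pv_main data trains []
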